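-- pv_equiv track=rewrite | github.com/EdisonNi-hku/Robust_Evidence_Based_QA | training/parse_for_entailment_eval.py | extract_outer_parenthesis_content
-- ===== SOURCE A (Python) =====
-- def extract_outer_parenthesis_content(sentence):
--     # Strip trailing spaces and any trailing punctuation
--     sentence = sentence.rstrip(" .,;!?")
--     num_close = 0
--     end_idx = len(sentence)
--     for i in range(len(sentence) - 1, -1, -1):
--         if sentence[i] == ')':
--             num_close += 1
--             if num_close == 1:
--                 end_idx = i
--         elif sentence[i] == '(' and num_close == 1:
--             return sentence[i+1:end_idx]
--         if sentence[i] == '(' and num_close > 1: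
--             num_close -= 1
--     return None
-- ===== SOURCE B (Python) =====
-- def extract_outer_parenthesis_content(sentence):
--     # One forward pass with an explicit stack of '(' indices instead of A's
--     # backward scan with a close-counter.
--     s = sentence.rstrip(" .,;!?")
--     stack = []
--     last_close = None
--     open_of_last = None
--     for i, ch in enumerate(s):
--         if ch == '(':
--             stack.append(i)
--         elif ch == ')':
--             last_close = i
--             open_of_last = stack.pop() if stack else None
--     if last_close is None or open_of_last is None:
--         return None
--     return s[open_of_last + 1:last_close]
-- ===== Notes on version B (the rewrite author's own statement) =====
-- stated objective: alternative
-- what changed: Replaces A's backward scan with a close-parenthesis counter by a single forward pass that keeps an explicit stack of '(' indices and records, at each ')', the index of its matching '('; the pair recorded at the last ')' gives the answer.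
import Mathlib
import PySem

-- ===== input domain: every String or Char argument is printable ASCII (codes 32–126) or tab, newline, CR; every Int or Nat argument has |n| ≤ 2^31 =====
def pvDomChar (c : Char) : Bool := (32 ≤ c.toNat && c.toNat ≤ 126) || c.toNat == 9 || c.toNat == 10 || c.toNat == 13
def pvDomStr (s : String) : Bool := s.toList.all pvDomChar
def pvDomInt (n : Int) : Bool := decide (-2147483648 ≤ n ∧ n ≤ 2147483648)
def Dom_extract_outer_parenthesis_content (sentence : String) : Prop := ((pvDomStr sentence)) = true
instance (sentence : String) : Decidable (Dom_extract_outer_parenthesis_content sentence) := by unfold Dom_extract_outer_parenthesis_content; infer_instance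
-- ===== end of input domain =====

-- B replaces A's backward counter scan by one forward pass with an explicit stack of '(' indices (objective: alternative, same cost).

-- Shared helper: exact port of Python's str.rstrip(chars) (strip chars from the right while they are in the set).
def pyRstripPunct (s : List Char) : List Char :=
  ((s.reverse.dropWhile (fun c => (" .,;!?".toList).contains c))).reverse

-- ===== PORT A =====
-- A's loop 'for i in range(len(s)-1, -1, -1)': argument n means "index n-1 is processed next"; state (num_close, end_idx).
def loopA (s : List Char) : Nat → Nat → Nat → Option (List Char)
  | 0, _, _ => none
  | (i+1), nc, e =>
    let c := s.getD i ' '   -- in range on every call made (i < s.length), so getD is exact for Python's s[i]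
    if c = ')' then
      loopA s i (nc + 1) (if nc + 1 = 1 then i else e)
    else if c = '(' ∧ nc = 1 then
      some (PySem.List.slice s (some ((i : Int) + 1)) (some ((e : Int))))
    else if c = '(' ∧ nc > 1 then
      loopA s i (nc - 1) e
    else
      loopA s i nc e

def extract_outer_parenthesis_content (sentence : String) : Option String :=
  let s := pyRstripPunct sentence.toList
  (loopA s s.length 0 s.length).map String.mk

-- ===== PORT B =====
-- B's single forward loop: state (stack of '(' indices, last_close, open_of_last); stack.pop()-if-stack = head?/tail.
def scanB : List Char → Nat → List Nat → Option Nat → Option Nat → (List Nat × Option Nat × Option Nat)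
  | [], _, st, lc, op => (st, lc, op)
  | ch :: r, i, st, lc, op =>
    if ch = '(' then scanB r (i + 1) (i :: st) lc op
    else if ch = ')' then scanB r (i + 1) st.tail (some i) st.head?
    else scanB r (i + 1) st lc op

def extract_outer_parenthesis_content_alt (sentence : String) : Option String :=
  let s := pyRstripPunct sentence.toList
  match (scanB s 0 [] none none).2 with
  | (some j, some t) => some (String.mk (PySem.List.slice s (some ((t : Int) + 1)) (some ((j : Int)))))
  | _ => none

-- ===== PRECONDITION & SPEC =====
def Spec_extract_outer_parenthesis_content (sentence : String) (out : Option String) : Prop := out = extract_outer_parenthesis_content_alt sentence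
instance (sentence : String) (out : Option String) : Decidable (Spec_extract_outer_parenthesis_content sentence out) := by unfold Spec_extract_outer_parenthesis_content; infer_instance

-- ===== CLAIM (what is proved, stated in full; the proofs are below) =====
def Claim_equal_extract_outer_parenthesis_content : Prop := ∀ (sentence : String), Dom_extract_outer_parenthesis_content sentence → Spec_extract_outer_parenthesis_content sentence (extract_outer_parenthesis_content sentence)

-- ===== LEMMAS AND PROOFS =====

-- forward stack contents alone (proof-side abstraction of scanB's first component)
def stk : List Char → Nat → List Nat → List Nat
  | [], _, st => st
  | ch :: r, i, st =>
    stk r (i + 1) (if ch = '(' then i :: st else if ch = ')' then st.tail else st)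

theorem scanB_fst (p : List Char) : ∀ i st lc op, (scanB p i st lc op).1 = stk p i st := by
  induction p with
  | nil => intro i st lc op; rfl
  | cons ch r ih =>
      intro i st lc op
      simp only [scanB, stk]
      split_ifs <;> simp [ih]

theorem scanB_concat (p q : List Char) : ∀ i st lc op,
    scanB (p ++ q) i st lc op =
      scanB q (i + p.length) (scanB p i st lc op).1 (scanB p i st lc op).2.1 (scanB p i st lc op).2.2 := by
  induction p with
  | nil => intro i st lc op; simp [scanB]
  | cons ch r ih =>
      intro i st lc op
      simp only [List.cons_append, scanB]
      split_ifs with h1 h2 <;>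
        simp [ih, Nat.add_assoc, Nat.add_comm 1 r.length]

theorem scanB_no_close (p : List Char) (hp : ∀ c ∈ p, c ≠ ')') :
    ∀ i st lc op, (scanB p i st lc op).2 = (lc, op) := by
  induction p with
  | nil => intro i st lc op; rfl
  | cons ch r ih =>
      intro i st lc op
      have hc : ch ≠ ')' := hp ch (List.mem_cons_self ..)
      have hr : ∀ c ∈ r, c ≠ ')' := fun c hcm => hp c (List.mem_cons_of_mem _ hcm)
      by_cases h1 : ch = '('
      · simp only [scanB, if_pos h1]; exact ih hr ..
      · by_cases h2 : ch = ')'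
        · exact absurd h2 hc
        · simp only [scanB, if_neg h1, if_neg h2]; exact ih hr ..

theorem loopA_skip (s : List Char) (e : Nat) : ∀ n m, m ≤ n →
    (∀ i, m ≤ i → i < n → s.getD i ' ' ≠ ')') →
    loopA s n 0 e = loopA s m 0 e := by
  intro n
  induction n with
  | zero => intro m hm _; interval_cases m; rfl
  | succ k ih =>
      intro m hm hno
      rcases Nat.eq_or_lt_of_le hm with h | h
      · rw [h]
      · have hk : m ≤ k := Nat.lt_succ_iff.mp h
        have hck : s.getD k ' ' ≠ ')' := hno k hk (Nat.lt_succ_self k)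
        have step : loopA s (k+1) 0 e = loopA s k 0 e := by
          simp only [loopA]
          split_ifs <;> first | rfl | exact absurd (by assumption) hck | simp_all | omega
        rw [step, ih m hk (fun i h1 h2 => hno i h1 (Nat.lt_succ_of_lt h2))]

theorem getElem?_tail' {α : Type} (l : List α) (k : Nat) : l.tail[k]? = l[k+1]? := by
  cases l <;> simp

-- core: A's backward counter scan from index j equals a lookup into the forward stack of the prefix before j
theorem loopA_eq_stk (s : List Char) : ∀ j, j ≤ s.length → ∀ nc e, 1 ≤ nc →
    loopA s j nc e =
      match (stk (s.take j) 0 [])[nc - 1]? with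
      | some t => some (PySem.List.slice s (some ((t : Int) + 1)) (some ((e : Int))))
      | none => none := by
  intro j
  induction j with
  | zero => intro _ nc e _; simp [loopA, stk]
  | succ k ih =>
      intro hj nc e hnc
      have hk : k < s.length := hj
      have htake : s.take (k+1) = s.take k ++ [s[k]] := by
        rw [List.take_succ]; simp [hk]
      have hstk_app : ∀ (c : Char) (st : List Nat),
          stk (s.take k ++ [c]) 0 st =
            (if c = '(' then k :: stk (s.take k) 0 st
             else if c = ')' then (stk (s.take k) 0 st).tail
             else stk (s.take k) 0 st) := by
        -- generalized append step for stk
        intro c st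
        have key : ∀ (p : List Char) (i : Nat) (st : List Nat),
            stk (p ++ [c]) i st =
              (if c = '(' then (i + p.length) :: stk p i st
               else if c = ')' then (stk p i st).tail
               else stk p i st) := by
          intro p
          induction p with
          | nil => intro i st; simp [stk]
          | cons ch r ihp =>
              intro i st
              simp only [List.cons_append, stk, ihp]
              split_ifs <;> simp [Nat.add_assoc, Nat.add_comm 1 r.length]
        have := key (s.take k) 0
        simpa [List.length_take, Nat.min_eq_left (Nat.le_of_lt hk)] using this st
      have hgetD : s.getD k ' ' = s[k] := by
        simp [List.getD_eq_getElem?_getD, hk]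
      have hstep : loopA s (k+1) nc e =
          (if s[k] = ')' then loopA s k (nc+1) (if nc + 1 = 1 then k else e)
           else if s[k] = '(' ∧ nc = 1 then
             some (PySem.List.slice s (some ((k : Int) + 1)) (some ((e : Int))))
           else if s[k] = '(' ∧ nc > 1 then loopA s k (nc-1) e
           else loopA s k nc e) := by
        simp only [loopA, hgetD]
      rw [hstep, htake, hstk_app]
      by_cases h1 : s[k] = ')'
      · have hne : ¬ (nc + 1 = 1) := by omega
        rw [if_pos h1, if_neg hne, h1]
        rw [if_neg (by decide), if_pos rfl]
        rw [ih (Nat.le_of_lt hk) (nc+1) e (by omega)]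
        rw [getElem?_tail']
        have hi : nc + 1 - 1 = nc - 1 + 1 := by omega
        rw [hi]
      · by_cases h2 : s[k] = '('
        · rw [if_neg h1, h2, if_pos rfl]
          by_cases h3 : nc = 1
          · rw [if_pos ⟨rfl, h3⟩]
            simp [h3]
          · have hnc2 : nc > 1 := by omega
            rw [if_neg (fun hh => h3 hh.2), if_pos ⟨rfl, hnc2⟩]
            rw [ih (Nat.le_of_lt hk) (nc-1) e (by omega)]
            have hi : nc - 1 = (nc - 1 - 1) + 1 := by omega
            rw [hi, List.getElem?_cons_succ]
            norm_num
        · rw [if_neg h1, if_neg (fun hh => h2 hh.1), if_neg (fun hh => h2 hh.1)]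
          rw [if_neg h2, if_neg h1]
          exact ih (Nat.le_of_lt hk) nc e hnc

-- last occurrence of ')' : index and the no-later-close property, via findIdx on the reverse
theorem main_eq (s : List Char) :
    (loopA s s.length 0 s.length).map String.mk =
      (match (scanB s 0 [] none none).2 with
       | (some j, some t) => some (String.mk (PySem.List.slice s (some ((t : Int) + 1)) (some ((j : Int)))))
       | _ => none) := by
  by_cases h : ')' ∈ s
  · -- j = last index of ')'
    have hrev : ')' ∈ s.reverse := by simpa using h
    obtain ⟨k, hk⟩ : ∃ k, k = s.reverse.findIdx (· = ')') := ⟨_, rfl⟩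
    have hklt : k < s.length := by
      have := List.findIdx_lt_length_of_exists (p := (· = ')')) (xs := s.reverse)
        ⟨')', hrev, by simp⟩
      rw [← hk] at this
      simpa using this
    obtain ⟨j, hj⟩ : ∃ j, j = s.length - 1 - k := ⟨_, rfl⟩
    have hjlt : j < s.length := by omega
    have hjk : s.length - 1 - j = k := by omega
    have hsj : s[j] = ')' := by
      have h1 : s.reverse[k]'(by simpa using hklt) = ')' := by
        subst hk
        have := List.findIdx_getElem (w := by simpa using hklt)
          (xs := s.reverse) (p := (· = ')'))
        simpa using this
      rw [List.getElem_reverse] at h1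
      have : s.length - 1 - k = j := by omega
      simpa [this] using h1
    have hafter : ∀ i (_ : j < i) (hi : i < s.length), s[i]'hi ≠ ')' := by
      intro i hji hilt
      have hidx : s.length - 1 - i < k := by omega
      have := List.not_of_lt_findIdx (p := (· = ')')) (xs := s.reverse) (hk ▸ hidx)
      rw [List.getElem_reverse] at this
      have heq : s.length - 1 - (s.length - 1 - i) = i := by omega
      simpa [heq] using this
    -- A side
    have hA1 : loopA s s.length 0 s.length = loopA s (j+1) 0 s.length := by
      apply loopA_skip s s.length s.length (j+1) (by omega)
      intro i h1 h2
      have : s.getD i ' ' = s[i]'(h2) := by simp [List.getD_eq_getElem?_getD, h2]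
      rw [this]; exact hafter i (by omega) h2
    have hA2 : loopA s (j+1) 0 s.length = loopA s j 1 j := by
      have hgetD : s.getD j ' ' = ')' := by
        simp [List.getD_eq_getElem?_getD, hjlt, hsj]
      simp only [loopA, hgetD]
      norm_num
    -- B side
    have hsplit : s = s.take j ++ [')'] ++ s.drop (j+1) := by
      have hd : s.drop j = ')' :: s.drop (j+1) := by
        rw [List.drop_eq_getElem_cons hjlt, hsj]
      rw [List.append_assoc, List.singleton_append, ← hd, List.take_append_drop]
    have hlen_take : (s.take j).length = j := by
      simp [Nat.le_of_lt hjlt]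
    have hdrop_no : ∀ c ∈ s.drop (j+1), c ≠ ')' := by
      intro c hc
      obtain ⟨i, hilt, hie⟩ := List.getElem_of_mem hc
      rw [List.getElem_drop] at hie
      subst hie
      have hlen : i < s.length - (j+1) := by simpa using hilt
      exact hafter (j+1+i) (by omega) (by omega)
    have hB : (scanB s 0 [] none none).2 = (some j, (stk (s.take j) 0 []).head?) := by
      conv_lhs => rw [hsplit]
      rw [List.append_assoc, scanB_concat]
      simp only [scanB_fst, hlen_take, Nat.zero_add]
      simp only [List.cons_append, List.nil_append, scanB]
      rw [if_neg (show ¬ ((')' : Char) = '(') by decide), if_pos trivial]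
      rw [scanB_no_close _ hdrop_no]
    have hcore := loopA_eq_stk s j (Nat.le_of_lt hjlt) 1 j (le_refl 1)
    rw [hA1, hA2, hcore, hB]
    cases hh : (stk (s.take j) 0 [])[0]? with
    | none => simp [List.head?_eq_getElem?, hh]
    | some t => simp [List.head?_eq_getElem?, hh]
  · -- no ')' at all: both none
    have hno : ∀ i, 0 ≤ i → i < s.length → s.getD i ' ' ≠ ')' := by
      intro i _ hi
      have : s.getD i ' ' = s[i]'hi := by simp [List.getD_eq_getElem?_getD, hi]
      rw [this]
      intro hc; exact h (hc ▸ List.getElem_mem hi)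
    have hA : loopA s s.length 0 s.length = none := by
      rw [loopA_skip s s.length s.length 0 (Nat.zero_le _) hno]; rfl
    have hB : (scanB s 0 [] none none).2 = (none, none) :=
      scanB_no_close s (fun c hc hc' => h (hc' ▸ hc)) 0 [] none none
    rw [hA, hB]
    rfl

-- ===== VERDICT (by name: the statement is the Claim_ definition above) =====
theorem extract_outer_parenthesis_content_spec : Claim_equal_extract_outer_parenthesis_content := by
  intro sentence _
  unfold Spec_extract_outer_parenthesis_content extract_outer_parenthesis_content extract_outer_parenthesis_content_alt
  exact main_eq (pyRstripPunct sentence.toList)
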